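-- pv_equiv track=rewrite | github.com/dheeraj009joshi/unileverImageStudy | utils/task_generation.py | visible_capacity
-- ===== SOURCE A (Python) =====
-- from typing import Dict, List, Tuple, Optional, Any
--
-- def visible_capacity(category_info: Dict[str, List[str]],
--                      min_active: int,
--                      max_active: Optional[int] = None) -> int:
--     """Absence-collapsed count of distinct row patterns with ≥ min_active actives,
--        optionally capped at ≤ max_active actives per row."""
--     cats = list(category_info.keys())
--     m = [len(category_info[c]) for c in cats]
--     C = len(m)
--     coeff = [0]*(C+1); coeff[0] = 1
--     for mi in m:
--         nxt=[0]*(C+1)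
--         for k in range(C+1):
--             if coeff[k]==0: continue
--             nxt[k] += coeff[k]           # ABS choice
--             if k+1<=C: nxt[k+1] += coeff[k]*mi  # choose an element
--         coeff = nxt
--     hi = C if max_active is None else min(max_active, C)
--     lo = max(min_active, 0)
--     if lo > hi:
--         return 0
--     return sum(coeff[k] for k in range(lo, hi+1))
-- ===== SOURCE B (Python) =====
-- from typing import Dict, List, Tuple, Optional, Any
--
--
-- def _conv(p, q):
--     """Schoolbook polynomial multiplication of coefficient lists."""
--     return [sum(p[i] * q[k - i] for i in range(k + 1)
--                 if i < len(p) and k - i < len(q))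
--             for k in range(len(p) + len(q) - 1)]
--
--
-- def _prod_poly(m):
--     """Coefficient list of prod_i (1 + m_i * x), by divide and conquer."""
--     if len(m) == 0:
--         return [1]
--     if len(m) == 1:
--         return [1, m[0]]
--     h = len(m) // 2
--     return _conv(_prod_poly(m[:h]), _prod_poly(m[h:]))
--
--
-- def visible_capacity(category_info: Dict[str, List[str]],
--                      min_active: int,
--                      max_active: Optional[int] = None) -> int:
--     cats = list(category_info.keys())
--     m = [len(category_info[c]) for c in cats]
--     C = len(m)
--     coeff = _prod_poly(m)
--     hi = C if max_active is None else min(max_active, C)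
--     lo = max(min_active, 0)
--     if lo > hi:
--         return 0
--     return sum(coeff[k] for k in range(lo, hi + 1))
-- ===== Notes on version B (the rewrite author's own statement) =====
-- stated objective: alternative
-- what changed: Replaces A's linear left-to-right accumulation into a fixed (C+1)-slot array (multiplying in one factor (1+m_i x) per pass with a zero-skip) by a divide-and-conquer product: recursively split the multiplicity list, compute each half's coefficient vector, and combine with a schoolbook convolution.
import Mathlib
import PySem

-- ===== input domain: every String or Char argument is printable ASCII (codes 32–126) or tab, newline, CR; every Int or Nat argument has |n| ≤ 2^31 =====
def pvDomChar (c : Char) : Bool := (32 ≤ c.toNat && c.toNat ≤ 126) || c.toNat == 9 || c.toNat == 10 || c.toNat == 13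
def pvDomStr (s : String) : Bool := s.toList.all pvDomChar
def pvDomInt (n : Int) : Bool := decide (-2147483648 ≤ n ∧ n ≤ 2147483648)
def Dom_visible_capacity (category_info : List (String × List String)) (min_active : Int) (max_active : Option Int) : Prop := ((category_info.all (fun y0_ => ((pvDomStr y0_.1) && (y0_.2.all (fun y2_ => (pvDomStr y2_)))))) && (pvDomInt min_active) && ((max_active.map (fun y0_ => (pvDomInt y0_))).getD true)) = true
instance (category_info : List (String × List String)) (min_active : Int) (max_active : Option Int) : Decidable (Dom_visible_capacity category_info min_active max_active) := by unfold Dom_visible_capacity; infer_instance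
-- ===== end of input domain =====

-- B replaces A's linear factor-by-factor accumulation into a fixed array by a divide-and-conquer
-- polynomial product with schoolbook convolution (objective: alternative algorithm, same cost).

-- ===== PORT A =====
-- A-side helper: the body of A's 'for mi in m' loop (the inner 'for k in range(C+1)' pass), verbatim
def pvInnerA (C : Nat) (coeff : List Int) (mi : Int) : List Int :=
  (List.range (C+1)).foldl (fun nxt k =>
    if coeff.getD k 0 = 0 then nxt                                        -- if coeff[k]==0: continue
    else
      let nxt1 := nxt.set k (nxt.getD k 0 + coeff.getD k 0)               -- nxt[k] += coeff[k]
      if k + 1 ≤ C then nxt1.set (k+1) (nxt1.getD (k+1) 0 + coeff.getD k 0 * mi)  -- nxt[k+1] += coeff[k]*mi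
      else nxt1)
    (List.replicate (C+1) 0)                                              -- nxt = [0]*(C+1)

def visible_capacity (category_info : List (String × List String)) (min_active : Int) (max_active : Option Int) : Int :=
  let d := PySem.Dict.mk category_info
  let cats := d.keys
  -- category_info[c]: c is drawn from keys so the lookup always succeeds; getD's default is never used
  let m : List Int := cats.map (fun c => ((d.getD c []).length : Int))
  let C : Nat := m.length
  let coeff0 : List Int := (List.replicate (C+1) (0:Int)).set 0 1          -- coeff = [0]*(C+1); coeff[0]=1
  let coeff := m.foldl (pvInnerA C) coeff0
  let hi : Int := match max_active with | none => (C : Int) | some ma => min ma (C : Int)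
  let lo : Int := max min_active 0
  if lo > hi then 0
  -- coeff[k]: lo ≤ k ≤ hi ≤ C < len(coeff), so in range; pyGetD's default is never used
  else (PySem.List.pyRange lo (hi+1) 1).foldl (fun s k => s + PySem.List.pyGetD coeff k 0) 0

-- ===== PORT B =====
-- B-side helper: schoolbook convolution of two coefficient lists (Source B's _conv)
def pvConv (p q : List Int) : List Int :=
  (List.range (p.length + q.length - 1)).map (fun k =>
    (List.range (k+1)).foldl (fun s i =>
      if i < p.length ∧ k - i < q.length then s + p.getD i 0 * q.getD (k - i) 0 else s) 0)

-- B-side helper: coefficients of prod_i (1 + m_i x) by divide and conquer (Source B's _prod_poly)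
def pvProdPoly (m : List Int) : List Int :=
  if m.length = 0 then [1]
  else if m.length = 1 then [1, PySem.List.pyGetD m 0 0]   -- m[0], in range
  else
    pvConv (pvProdPoly (PySem.List.slice m none (some ((m.length / 2 : Nat) : Int))))   -- m[:h], h = len(m)//2
           (pvProdPoly (PySem.List.slice m (some ((m.length / 2 : Nat) : Int)) none))   -- m[h:]
termination_by m.length
decreasing_by
  · rw [PySem.List.slice_to_natCast]; simp; omega
  · rw [PySem.List.slice_from_natCast]; simp; omega

def visible_capacity_alt (category_info : List (String × List String)) (min_active : Int) (max_active : Option Int) : Int :=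
  let d := PySem.Dict.mk category_info
  let cats := d.keys
  -- category_info[c]: c is drawn from keys so the lookup always succeeds; getD's default is never used
  let m : List Int := cats.map (fun c => ((d.getD c []).length : Int))
  let C : Nat := m.length
  let coeff := pvProdPoly m
  let hi : Int := match max_active with | none => (C : Int) | some ma => min ma (C : Int)
  let lo : Int := max min_active 0
  if lo > hi then 0
  -- coeff[k]: lo ≤ k ≤ hi ≤ C < len(coeff), so in range; pyGetD's default is never used
  else (PySem.List.pyRange lo (hi+1) 1).foldl (fun s k => s + PySem.List.pyGetD coeff k 0) 0

-- ===== PRECONDITION & SPEC =====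
def Spec_visible_capacity (category_info : List (String × List String)) (min_active : Int) (max_active : Option Int) (out : Int) : Prop := out = visible_capacity_alt category_info min_active max_active
instance (category_info : List (String × List String)) (min_active : Int) (max_active : Option Int) (out : Int) : Decidable (Spec_visible_capacity category_info min_active max_active out) := by unfold Spec_visible_capacity; infer_instance

-- ===== CLAIM (what is proved, stated in full; the proofs are below) =====
def Claim_equal_visible_capacity : Prop := ∀ (category_info : List (String × List String)) (min_active : Int) (max_active : Option Int), Dom_visible_capacity category_info min_active max_active → Spec_visible_capacity category_info min_active max_active (visible_capacity category_info min_active max_active)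

-- ===== LEMMAS AND PROOFS =====

-- the reference polynomial prod_i (1 + m_i * X) over ℤ
noncomputable def pvF (m : List Int) : Polynomial ℤ := (m.map (fun mi => 1 + Polynomial.C mi * Polynomial.X)).prod

lemma pv_foldl_range_add (g : Nat → Int) (n : Nat) :
    (List.range n).foldl (fun s i => s + g i) 0 = ∑ i ∈ Finset.range n, g i := by
  induction n with
  | zero => simp
  | succ n ih => rw [List.range_succ, List.foldl_append, Finset.sum_range_succ, ih]; simp

lemma pv_getD_set (l : List Int) (n : Nat) (v : Int) (k : Nat) :
    (l.set n v).getD k 0 = if k = n ∧ n < l.length then v else l.getD k 0 := by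
  simp only [List.getD_eq_getElem?_getD, List.getElem?_set]
  split_ifs with h1 h2 h3 h4 <;> simp_all

lemma pv_coeff_mulLin (P : Polynomial ℤ) (a : Int) (k : Nat) :
    (P * (1 + Polynomial.C a * Polynomial.X)).coeff k
      = P.coeff k + (if k = 0 then 0 else a * P.coeff (k-1)) := by
  have : P * (1 + Polynomial.C a * Polynomial.X) = P + Polynomial.C a * (P * Polynomial.X) := by ring
  rw [this, Polynomial.coeff_add, Polynomial.coeff_C_mul]
  cases k with
  | zero => simp
  | succ n => simp [Polynomial.coeff_mul_X]

lemma pv_conv_spec (p q : List Int) (P Q : Polynomial ℤ)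
    (hp' : p ≠ []) (hq' : q ≠ [])
    (hp : ∀ j, p.getD j 0 = P.coeff j) (hq : ∀ j, q.getD j 0 = Q.coeff j) :
    ∀ k, (pvConv p q).getD k 0 = (P * Q).coeff k := by
  have hplen : 1 ≤ p.length := List.length_pos_iff.mpr hp'
  have hqlen : 1 ≤ q.length := List.length_pos_iff.mpr hq'
  have hPz : ∀ j, p.length ≤ j → P.coeff j = 0 := fun j hj => by
    rw [← hp]; exact List.getD_eq_default _ _ hj
  have hQz : ∀ j, q.length ≤ j → Q.coeff j = 0 := fun j hj => by
    rw [← hq]; exact List.getD_eq_default _ _ hj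
  intro k
  have hsum : (P * Q).coeff k = ∑ i ∈ Finset.range (k+1), P.coeff i * Q.coeff (k-i) := by
    rw [Polynomial.coeff_mul, Finset.Nat.sum_antidiagonal_eq_sum_range_succ_mk]
  have hterm : ∀ k' i : Nat,
      (if i < p.length ∧ k' - i < q.length then p.getD i 0 * q.getD (k'-i) 0 else 0)
        = P.coeff i * Q.coeff (k'-i) := by
    intro k' i
    by_cases h1 : i < p.length
    · by_cases h2 : k' - i < q.length
      · rw [if_pos ⟨h1, h2⟩, hp, hq]
      · rw [if_neg (by tauto), hQz _ (by omega), mul_zero]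
    · rw [if_neg (by tauto), hPz _ (by omega), zero_mul]
  have hfold : ∀ k' : Nat,
      (List.range (k'+1)).foldl (fun s i =>
        if i < p.length ∧ k' - i < q.length then s + p.getD i 0 * q.getD (k' - i) 0 else s) 0
        = ∑ i ∈ Finset.range (k'+1), P.coeff i * Q.coeff (k'-i) := by
    intro k'
    have hbody : (fun (s : Int) (i : Nat) =>
        if i < p.length ∧ k' - i < q.length then s + p.getD i 0 * q.getD (k' - i) 0 else s)
        = (fun s i => s + (if i < p.length ∧ k' - i < q.length then p.getD i 0 * q.getD (k'-i) 0 else 0)) := by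
      funext s i; split_ifs <;> simp
    rw [hbody, pv_foldl_range_add]
    exact Finset.sum_congr rfl (fun i _ => hterm k' i)
  by_cases hk : k < p.length + q.length - 1
  · have : (pvConv p q).getD k 0
        = (List.range (k+1)).foldl (fun s i =>
          if i < p.length ∧ k - i < q.length then s + p.getD i 0 * q.getD (k - i) 0 else s) 0 := by
      unfold pvConv
      rw [List.getD_eq_getElem?_getD]
      simp [List.getElem?_map, List.getElem?_range hk]
    rw [this, hfold, hsum]
  · have hlen : (pvConv p q).length ≤ k := by
      unfold pvConv; simp; omega
    rw [List.getD_eq_default _ _ hlen, hsum]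
    refine (Finset.sum_eq_zero ?_).symm
    intro i hi
    by_cases h1 : i < p.length
    · rw [hQz _ (by omega), mul_zero]
    · rw [hPz _ (by omega), zero_mul]

lemma pv_length_conv (p q : List Int) : (pvConv p q).length = p.length + q.length - 1 := by
  unfold pvConv; simp

lemma pv_prodPoly_length (m : List Int) : (pvProdPoly m).length = m.length + 1 := by
  induction m using pvProdPoly.induct with
  | case1 m h => unfold pvProdPoly; simp [h]
  | case2 m h h1 => unfold pvProdPoly; simp [h1]
  | case3 m h h1 ih1 ih2 =>
    unfold pvProdPoly
    rw [if_neg h, if_neg h1, pv_length_conv, ih1, ih2]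
    rw [PySem.List.slice_to_natCast, PySem.List.slice_from_natCast]
    simp; omega

lemma pv_prodPoly_spec (m : List Int) : ∀ k, (pvProdPoly m).getD k 0 = (pvF m).coeff k := by
  induction m using pvProdPoly.induct with
  | case1 m h =>
    intro k
    rw [List.length_eq_zero_iff.mp h]
    unfold pvProdPoly pvF
    cases k <;> simp [Polynomial.coeff_one]
  | case2 m h h1 =>
    intro k
    obtain ⟨a, rfl⟩ := List.length_eq_one_iff.mp h1
    unfold pvProdPoly pvF
    simp only [List.length_cons, List.length_nil]
    rw [if_pos trivial, PySem.List.pyGetD_zero_cons]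
    match k with
    | 0 => simp [Polynomial.coeff_add, Polynomial.coeff_one, Polynomial.coeff_X]
    | 1 => simp [Polynomial.coeff_add, Polynomial.coeff_one]
    | (n+2) =>
      simp only [List.map_cons, List.map_nil, List.prod_cons, List.prod_nil, mul_one,
        Polynomial.coeff_add, Polynomial.coeff_one, Polynomial.coeff_C_mul, Polynomial.coeff_X]
      simp
  | case3 m h h1 ih1 ih2 =>
    intro k
    unfold pvProdPoly
    rw [if_neg h, if_neg h1]
    have hl1 : (pvProdPoly (PySem.List.slice m none (some ((m.length / 2 : Nat) : Int)))) ≠ [] := by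
      have := pv_prodPoly_length (PySem.List.slice m none (some ((m.length / 2 : Nat) : Int)))
      intro hc; rw [hc] at this; simp at this
    have hl2 : (pvProdPoly (PySem.List.slice m (some ((m.length / 2 : Nat) : Int)) none)) ≠ [] := by
      have := pv_prodPoly_length (PySem.List.slice m (some ((m.length / 2 : Nat) : Int)) none)
      intro hc; rw [hc] at this; simp at this
    rw [pv_conv_spec _ _ (pvF (PySem.List.slice m none (some ((m.length / 2 : Nat) : Int))))
        (pvF (PySem.List.slice m (some ((m.length / 2 : Nat) : Int)) none)) hl1 hl2 ih1 ih2]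
    have hsplit : pvF (PySem.List.slice m none (some ((m.length / 2 : Nat) : Int)))
        * pvF (PySem.List.slice m (some ((m.length / 2 : Nat) : Int)) none) = pvF m := by
      rw [PySem.List.slice_to_natCast, PySem.List.slice_from_natCast]
      unfold pvF
      rw [← List.prod_append, ← List.map_append, List.take_append_drop]
    rw [hsplit]

-- the body of A's inner loop, named so the invariant can speak about it
def pvStep (C : Nat) (coeff : List Int) (mi : Int) (nxt : List Int) (k : Nat) : List Int :=
  if coeff.getD k 0 = 0 then nxt
  else
    let nxt1 := nxt.set k (nxt.getD k 0 + coeff.getD k 0)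
    if k + 1 ≤ C then nxt1.set (k+1) (nxt1.getD (k+1) 0 + coeff.getD k 0 * mi) else nxt1

lemma pvInnerA_eq (C : Nat) (coeff : List Int) (mi : Int) :
    pvInnerA C coeff mi = (List.range (C+1)).foldl (pvStep C coeff mi) (List.replicate (C+1) 0) := rfl

lemma pv_step_length (C : Nat) (coeff : List Int) (mi : Int) (g : List Int) (j : Nat) :
    (pvStep C coeff mi g j).length = g.length := by
  unfold pvStep; split_ifs <;> simp

lemma pv_step_getD (C : Nat) (coeff : List Int) (mi : Int) (g : List Int) (j : Nat)
    (hg : g.length = C+1) (hj : j ≤ C) (k : Nat) :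
    (pvStep C coeff mi g j).getD k 0 =
      g.getD k 0 + (if k = j then coeff.getD j 0 else 0)
        + (if k = j + 1 ∧ k ≤ C then coeff.getD j 0 * mi else 0) := by
  unfold pvStep
  by_cases h0 : coeff.getD j 0 = 0
  · rw [if_pos h0, h0]; simp
  · rw [if_neg h0]
    simp only
    by_cases hc : j + 1 ≤ C
    · rw [if_pos hc]
      by_cases hk1 : k = j + 1
      · subst hk1
        rw [pv_getD_set, if_pos ⟨rfl, by simp [hg]; omega⟩]
        rw [pv_getD_set, if_neg (by omega)]
        rw [if_neg (by omega), if_pos ⟨rfl, hc⟩]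
        ring
      · rw [pv_getD_set, if_neg (by tauto)]
        rw [pv_getD_set]
        by_cases hk2 : k = j
        · subst hk2
          rw [if_pos ⟨rfl, by omega⟩, if_pos rfl, if_neg (by tauto)]
          ring
        · rw [if_neg (by tauto), if_neg hk2, if_neg (by tauto)]
          ring
    · rw [if_neg hc]
      rw [pv_getD_set]
      by_cases hk2 : k = j
      · subst hk2
        rw [if_pos ⟨rfl, by omega⟩, if_pos rfl, if_neg (by omega)]
        ring
      · rw [if_neg (by tauto), if_neg hk2, if_neg (by rintro ⟨a, b⟩; omega)]
        ring

lemma pv_innerA_inv (C : Nat) (coeff : List Int) (mi : Int) :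
    ∀ j, j ≤ C+1 →
      ((List.range j).foldl (pvStep C coeff mi) (List.replicate (C+1) 0)).length = C+1 ∧
      ∀ k, ((List.range j).foldl (pvStep C coeff mi) (List.replicate (C+1) 0)).getD k 0 =
        (if k < j then coeff.getD k 0 else 0)
          + (if 1 ≤ k ∧ k ≤ C ∧ k - 1 < j then coeff.getD (k-1) 0 * mi else 0) := by
  intro j
  induction j with
  | zero =>
    intro _
    refine ⟨by simp, fun k => ?_⟩
    rw [List.range_zero, List.foldl_nil]
    rw [List.getD_eq_getElem?_getD, List.getElem?_replicate]
    split_ifs <;> simp <;> omega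
  | succ j ih =>
    intro hj1
    obtain ⟨hg, hgk⟩ := ih (by omega)
    rw [List.range_succ, List.foldl_append, List.foldl_cons, List.foldl_nil]
    refine ⟨by rw [pv_step_length, hg], fun k => ?_⟩
    rw [pv_step_getD C coeff mi _ j hg (by omega) k, hgk k]
    have e1 : (if k < j+1 then coeff.getD k 0 else 0)
        = (if k < j then coeff.getD k 0 else 0) + (if k = j then coeff.getD j 0 else 0) := by
      by_cases h : k < j
      · rw [if_pos (by omega), if_pos h, if_neg (by omega)]; ring
      · by_cases h2 : k = j
        · subst h2; rw [if_pos (by omega), if_neg h, if_pos rfl]; ring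
        · rw [if_neg (by omega), if_neg h, if_neg h2]; ring
    have e2 : (if 1 ≤ k ∧ k ≤ C ∧ k - 1 < j+1 then coeff.getD (k-1) 0 * mi else 0)
        = (if 1 ≤ k ∧ k ≤ C ∧ k - 1 < j then coeff.getD (k-1) 0 * mi else 0)
          + (if k = j + 1 ∧ k ≤ C then coeff.getD j 0 * mi else 0) := by
      by_cases hk1 : k = j + 1
      · subst hk1
        have hidx : (j+1) - 1 = j := by omega
        by_cases hc : j + 1 ≤ C
        · rw [if_pos ⟨by omega, hc, by omega⟩, if_neg (by omega), if_pos ⟨rfl, hc⟩, hidx]; ring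
        · rw [if_neg (by rintro ⟨a, b, c⟩; omega), if_neg (by rintro ⟨a, b, c⟩; omega),
            if_neg (by rintro ⟨a, b⟩; omega)]
          ring
      · by_cases hcond : 1 ≤ k ∧ k ≤ C ∧ k - 1 < j
        · rw [if_pos ⟨hcond.1, hcond.2.1, by omega⟩, if_pos hcond, if_neg (by tauto)]; ring
        · rw [if_neg (by rintro ⟨a, b, c⟩; exact hcond ⟨a, b, by omega⟩), if_neg hcond,
            if_neg (by tauto)]
          ring
    rw [e1, e2]
    ring

lemma pv_innerA_spec (C : Nat) (coeff : List Int) (mi : Int) :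
    (pvInnerA C coeff mi).length = C+1 ∧
    ∀ k, (pvInnerA C coeff mi).getD k 0 =
      if k ≤ C then coeff.getD k 0 + (if k = 0 then 0 else coeff.getD (k-1) 0 * mi) else 0 := by
  obtain ⟨hlen, hget⟩ := pv_innerA_inv C coeff mi (C+1) (le_refl _)
  rw [pvInnerA_eq]
  refine ⟨hlen, fun k => ?_⟩
  rw [hget k]
  by_cases hk : k ≤ C
  · rw [if_pos hk, if_pos (by omega)]
    by_cases h1 : k = 0
    · subst h1
      rw [if_neg (by rintro ⟨a, b, c⟩; omega), if_pos rfl]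
    · rw [if_pos ⟨by omega, hk, by omega⟩, if_neg h1]
  · rw [if_neg hk, if_neg (by omega), if_neg (by rintro ⟨a, b, c⟩; omega)]; ring

lemma pv_foldA_spec (C : Nat) : ∀ (suf : List Int) (coeff : List Int) (P : Polynomial ℤ),
    coeff.length = C+1 → (∀ k, coeff.getD k 0 = P.coeff k) →
    (∀ k, C < k + suf.length → P.coeff k = 0) →
    (suf.foldl (pvInnerA C) coeff).length = C+1 ∧
    ∀ k, (suf.foldl (pvInnerA C) coeff).getD k 0 = (P * pvF suf).coeff k := by
  intro suf
  induction suf with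
  | nil =>
    intro coeff P hlen hp _
    refine ⟨hlen, fun k => ?_⟩
    unfold pvF
    rw [List.map_nil, List.prod_nil, mul_one]
    exact hp k
  | cons a suf ih =>
    intro coeff P hlen hp hdeg
    rw [List.foldl_cons]
    obtain ⟨hl2, hg2⟩ := pv_innerA_spec C coeff a
    have hp' : ∀ k, (pvInnerA C coeff a).getD k 0
        = (P * (1 + Polynomial.C a * Polynomial.X)).coeff k := by
      intro k
      rw [hg2 k, pv_coeff_mulLin]
      by_cases hk : k ≤ C
      · rw [if_pos hk, hp k]
        by_cases h1 : k = 0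
        · subst h1; rw [if_pos rfl, if_pos rfl]
        · rw [if_neg h1, if_neg h1, hp (k-1)]; ring
      · rw [if_neg hk]
        have h1 : P.coeff k = 0 := by rw [← hp k]; exact List.getD_eq_default _ _ (by omega)
        have h2 : P.coeff (k-1) = 0 := by
          apply hdeg; simp only [List.length_cons]; omega
        rw [h1, h2, if_neg (by omega)]
        ring
    have hdeg' : ∀ k, C < k + suf.length
        → (P * (1 + Polynomial.C a * Polynomial.X)).coeff k = 0 := by
      intro k hk
      rw [pv_coeff_mulLin]
      by_cases h1 : k = 0
      · subst h1
        rw [hdeg 0 (by simp only [List.length_cons]; omega), if_pos rfl]; ring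
      · rw [hdeg k (by simp only [List.length_cons]; omega),
          hdeg (k-1) (by simp only [List.length_cons]; omega), if_neg h1]; ring
    obtain ⟨hL, hK⟩ := ih (pvInnerA C coeff a) (P * (1 + Polynomial.C a * Polynomial.X)) hl2 hp' hdeg'
    refine ⟨hL, fun k => ?_⟩
    rw [hK k]
    congr 1
    unfold pvF
    rw [List.map_cons, List.prod_cons]
    ring

lemma pv_main (m : List Int) :
    ∀ k, (m.foldl (pvInnerA m.length) ((List.replicate (m.length+1) (0:Int)).set 0 1)).getD k 0
      = (pvProdPoly m).getD k 0 := by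
  intro k
  have h0 : ∀ k', ((List.replicate (m.length+1) (0:Int)).set 0 1).getD k' 0
      = (1 : Polynomial ℤ).coeff k' := by
    intro k'
    rw [pv_getD_set, Polynomial.coeff_one]
    by_cases h : k' = 0
    · subst h; rw [if_pos ⟨rfl, by simp⟩, if_pos rfl]
    · rw [if_neg (by tauto), if_neg h]
      rw [List.getD_eq_getElem?_getD, List.getElem?_replicate]
      split_ifs <;> rfl
  obtain ⟨_, hK⟩ := pv_foldA_spec m.length m ((List.replicate (m.length+1) (0:Int)).set 0 1) 1
    (by simp) h0 (fun k' hk' => by rw [Polynomial.coeff_one, if_neg (by omega)])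
  rw [hK k, one_mul, pv_prodPoly_spec m k]

-- ===== VERDICT (by name: the statement is the Claim_ definition above) =====
theorem visible_capacity_spec : Claim_equal_visible_capacity := by
  intro category_info min_active max_active _
  unfold Spec_visible_capacity
  dsimp only [visible_capacity, visible_capacity_alt]
  split_ifs with h
  · rfl
  · apply PySem.List.foldl_congr_mem
    intro acc x hx
    congr 1
    have hx' := (PySem.List.mem_pyRange_one).mp hx
    have hx0 : (0:Int) ≤ x := le_trans (le_max_right _ _) hx'.1
    obtain ⟨n, rfl⟩ : ∃ n : ℕ, x = (n : Int) := ⟨x.toNat, (Int.toNat_of_nonneg hx0).symm⟩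
    rw [PySem.List.pyGetD_natCast, PySem.List.pyGetD_natCast, pv_main _ n]
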